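-- pv_equiv track=rewrite | github.com/Lucstanislash/Projet-Python | TestTab.py | listintodico
-- ===== SOURCE A (Python) =====
-- def listintodico(liste):
--     li=[]
--     i=0
--     cpt=0
--     while i<len(liste):
--         if i+3>len(liste):
--             break
--         li.append(str({"n": liste[cpt], "da": liste[i], "d": liste[i+1], "prio": liste[i+2]}))
--         cpt+=1
--         i=i+3
--     return(li)
-- ===== SOURCE B (Python) =====
-- def listintodico(liste):
--     it = iter(liste)
--     return [str({"n": liste[k], "da": a, "d": b, "prio": c})
--             for k, (a, b, c) in enumerate(zip(it, it, it))]
-- ===== Notes on version B (the rewrite author's own statement) =====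
-- stated objective: idiomatic
-- what changed: Replaces the manual while-loop with index/counter/break state by a list comprehension over enumerate(zip(it, it, it)) on a single iterator (the grouper idiom), which yields each triple directly and stops when fewer than three elements remain.
import Mathlib
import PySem

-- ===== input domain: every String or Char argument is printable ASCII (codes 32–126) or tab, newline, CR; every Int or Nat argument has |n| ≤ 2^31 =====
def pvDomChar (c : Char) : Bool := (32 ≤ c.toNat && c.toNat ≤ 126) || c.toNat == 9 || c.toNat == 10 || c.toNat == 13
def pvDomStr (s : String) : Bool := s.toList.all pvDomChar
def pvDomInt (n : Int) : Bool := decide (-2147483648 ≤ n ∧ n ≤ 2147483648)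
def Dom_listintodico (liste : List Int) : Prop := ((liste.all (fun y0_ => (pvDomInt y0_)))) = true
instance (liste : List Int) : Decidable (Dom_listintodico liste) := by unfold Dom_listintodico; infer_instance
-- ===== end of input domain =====

-- B replaces A's manual index/counter while-loop by the idiomatic grouper idiom
-- enumerate(zip(it, it, it)) — same O(n) cost, no index arithmetic (objective: idiomatic).

-- Both Pythons call str({...}) on an int-valued dict with these literal keys;
-- this helper is the exact rendering of that str() (Python's repr of an int is
-- str(int) = PySem.Int.toStr, keys in insertion order n, da, d, prio).
def pvFmt (n da d prio : Int) : String :=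
  "{'n': " ++ PySem.Int.toStr n ++ ", 'da': " ++ PySem.Int.toStr da ++
  ", 'd': " ++ PySem.Int.toStr d ++ ", 'prio': " ++ PySem.Int.toStr prio ++ "}"

-- ===== PORT A =====
-- the while-loop; indices cpt, i, i+1, i+2 are in range whenever the append runs
-- (i+3 ≤ len and cpt ≤ i), so pyGetD's default is never taken
def pvLoopA (liste : List Int) (i cpt : Nat) (li : List String) : List String :=
  if i < liste.length then
    if i + 3 > liste.length then li
    else pvLoopA liste (i + 3) (cpt + 1)
      (li ++ [pvFmt (PySem.List.pyGetD liste (cpt : Int) 0)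
                    (PySem.List.pyGetD liste (i : Int) 0)
                    (PySem.List.pyGetD liste ((i : Int) + 1) 0)
                    (PySem.List.pyGetD liste ((i : Int) + 2) 0)])
  else li
termination_by liste.length - i

def listintodico (liste : List Int) : List String := pvLoopA liste 0 0 []

-- ===== PORT B =====
-- zip(it, it, it) on one shared list-backed iterator pulls three successive
-- elements per tuple and stops when fewer than three remain; exact port:
def pvZip3Iter {α : Type} : List α → List (α × α × α)
  | a :: b :: c :: t => (a, b, c) :: pvZip3Iter t
  | _ => []

def listintodico_alt (liste : List Int) : List String :=
  (PySem.List.enumerate (pvZip3Iter liste)).map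
    (fun p => pvFmt (PySem.List.pyGetD liste p.1 0) p.2.1 p.2.2.1 p.2.2.2)

-- ===== PRECONDITION & SPEC =====
def Spec_listintodico (liste : List Int) (out : List String) : Prop := out = listintodico_alt liste
instance (liste : List Int) (out : List String) : Decidable (Spec_listintodico liste out) := by unfold Spec_listintodico; infer_instance

-- ===== CLAIM (what is proved, stated in full; the proofs are below) =====
def Claim_equal_listintodico : Prop := ∀ (liste : List Int), Dom_listintodico liste → Spec_listintodico liste (listintodico liste)

-- ===== LEMMAS AND PROOFS =====

theorem pvZip3Iter_short {α : Type} (rest : List α) (h : rest.length < 3) :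
    pvZip3Iter rest = [] := by
  match rest with
  | [] => rfl
  | [_] => rfl
  | [_, _] => rfl
  | _ :: _ :: _ :: _ => simp at h; omega

theorem pvLoopA_eq (liste : List Int) :
    ∀ fuel i cpt li, liste.length - i ≤ fuel →
      pvLoopA liste i cpt li =
        li ++ (PySem.List.enumerate (pvZip3Iter (liste.drop i)) (cpt : Int)).map
          (fun p => pvFmt (PySem.List.pyGetD liste p.1 0) p.2.1 p.2.2.1 p.2.2.2) := by
  intro fuel
  induction fuel with
  | zero =>
    intro i cpt li hf
    rw [pvLoopA]
    have hi : ¬ i < liste.length := by omega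
    rw [if_neg hi]
    rw [List.drop_eq_nil_of_le (by omega)]
    simp [pvZip3Iter, PySem.List.enumerate_nil]
  | succ n ih =>
    intro i cpt li hf
    rw [pvLoopA]
    by_cases hi : i < liste.length
    · rw [if_pos hi]
      by_cases hb : i + 3 > liste.length
      · rw [if_pos hb]
        rw [pvZip3Iter_short _ (by simp; omega)]
        simp [PySem.List.enumerate_nil]
      · rw [if_neg hb]
        have h0 : i < liste.length := by omega
        have h1 : i + 1 < liste.length := by omega
        have h2 : i + 2 < liste.length := by omega
        have hd : liste.drop i =
            liste[i] :: liste[i+1] :: liste[i+2] :: liste.drop (i + 3) := by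
          rw [List.drop_eq_getElem_cons h0, List.drop_eq_getElem_cons h1,
              List.drop_eq_getElem_cons h2]
        rw [hd]
        show _ = li ++ (PySem.List.enumerate
            (pvZip3Iter (liste[i] :: liste[i+1] :: liste[i+2] :: liste.drop (i+3)))
            (cpt : Int)).map _
        rw [show pvZip3Iter (liste[i] :: liste[i+1] :: liste[i+2] :: liste.drop (i+3)) =
              (liste[i], liste[i+1], liste[i+2]) :: pvZip3Iter (liste.drop (i+3)) from rfl]
        rw [PySem.List.enumerate_cons]
        rw [List.map_cons]
        rw [ih (i + 3) (cpt + 1) _ (by omega)]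
        have e1 : ((i : Int) + 1) = ((i + 1 : Nat) : Int) := by push_cast; ring
        have e2 : ((i : Int) + 2) = ((i + 2 : Nat) : Int) := by push_cast; ring
        rw [e1, e2]
        simp only [PySem.List.pyGetD_natCast]
        simp [h0, h1, h2, Nat.cast_add, Nat.cast_one]
    · rw [if_neg hi]
      rw [List.drop_eq_nil_of_le (by omega)]
      simp [pvZip3Iter, PySem.List.enumerate_nil]

-- ===== VERDICT (by name: the statement is the Claim_ definition above) =====
theorem listintodico_spec : Claim_equal_listintodico := by
  intro liste _
  unfold Spec_listintodico listintodico listintodico_alt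
  rw [pvLoopA_eq liste liste.length 0 0 [] (by omega)]
  simp
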